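-- pv_equiv track=rewrite | github.com/ryanparsa/kubernetes-certification | scripts/split_ref.py | _split_at_h1
-- ===== SOURCE A (Python) =====
-- def _split_at_h1(content: str) -> tuple[str, list[tuple[str, str]]]:
--     """Split on H1 headings, treating the first as the document title (preamble)."""
--     lines = content.splitlines(keepends=True)
--     preamble_lines: list[str] = []
--     sections: list[tuple[str, str]] = []
--     current_heading: str | None = None
--     current_body: list[str] = []
--     first_h1_seen = False
--
--     for line in lines:
--         if line.startswith("# ") and not line.startswith("## "):
--             if not first_h1_seen:
--                 # This is the document title; add to preamble
--                 preamble_lines.append(line)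
--                 first_h1_seen = True
--             else:
--                 if current_heading is not None:
--                     sections.append((current_heading, "".join(current_body)))
--                 elif current_body:
--                     preamble_lines.extend(current_body)
--                 # Re-emit as ## heading so section files are consistent
--                 current_heading = "## " + line[2:].rstrip("\n")
--                 current_body = []
--         else:
--             current_body.append(line)
--
--     if current_heading is not None:
--         sections.append((current_heading, "".join(current_body)))
--     else:
--         preamble_lines.extend(current_body)
--
--     preamble = "".join(preamble_lines).strip()
--     return preamble, sections
-- ===== SOURCE B (Python) =====
-- def _is_h1(line: str) -> bool:
--     return line.startswith("# ") and not line.startswith("## ")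
--
--
-- def _take_until_h1(lines: list[str]) -> tuple[list[str], list[str]]:
--     """Split lines at the first H1: (prefix without H1, rest starting at the H1 or [])."""
--     pre: list[str] = []
--     while lines and not _is_h1(lines[0]):
--         pre.append(lines[0])
--         lines = lines[1:]
--     return pre, lines
--
--
-- def _split_at_h1(content: str) -> tuple[str, list[tuple[str, str]]]:
--     """Span-based chunking: peel the pre-title block, the title, the title's body,
--     then one (heading, body) chunk per remaining H1."""
--     lines = content.splitlines(keepends=True)
--     pre, rest = _take_until_h1(lines)
--     if not rest:
--         return "".join(pre).strip(), []
--     title, rest2 = rest[0], rest[1:]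
--     body0, rest3 = _take_until_h1(rest2)
--     preamble = "".join([title] + pre + body0).strip()
--     sections: list[tuple[str, str]] = []
--     while rest3:
--         h, tail = rest3[0], rest3[1:]
--         body, rest3 = _take_until_h1(tail)
--         sections.append(("## " + h[2:].rstrip("\n"), "".join(body)))
--     return preamble, sections
-- ===== Notes on version B (the rewrite author's own statement) =====
-- stated objective: alternative
-- what changed: Replaces A's single-pass state machine (first_h1_seen/current_heading/current_body flags and deferred flushes) by span-based chunking: repeatedly split the line list at the next H1, building preamble and each (heading, body) section from whole segments.
import Mathlib
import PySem

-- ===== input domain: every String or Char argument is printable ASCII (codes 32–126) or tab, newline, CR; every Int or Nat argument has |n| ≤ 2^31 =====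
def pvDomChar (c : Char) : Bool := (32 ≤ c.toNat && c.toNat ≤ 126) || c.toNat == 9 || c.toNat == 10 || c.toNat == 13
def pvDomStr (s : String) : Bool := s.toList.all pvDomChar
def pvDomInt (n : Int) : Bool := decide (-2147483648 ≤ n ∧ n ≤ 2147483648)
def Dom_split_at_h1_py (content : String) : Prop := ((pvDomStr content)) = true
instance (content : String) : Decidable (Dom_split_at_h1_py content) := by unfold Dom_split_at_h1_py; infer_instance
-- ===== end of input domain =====

-- B replaces A's one-pass state machine (heading/body/seen flags) by span-based chunking
-- (peel pre-title block, title, title body, then one chunk per H1); objective: alternative.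


-- shared primitive: content.splitlines(keepends=True); hand-ported (PySem.Str.splitlines drops
-- the line endings). Exact on the Dom alphabet, whose only line breaks are '\n', '\r', '\r\n'.
def pvSplitKeep : List Char → List (List Char)
  | [] => []
  | c :: rest =>
    if c = '\n' then [c] :: pvSplitKeep rest
    else if c = '\r' then
      if rest.head? = some '\n' then ['\r', '\n'] :: pvSplitKeep rest.tail
      else [c] :: pvSplitKeep rest
    else
      match pvSplitKeep rest with
      | [] => [[c]]
      | l :: ls => (c :: l) :: ls
termination_by cs => cs.length
decreasing_by all_goals simp [List.length_tail]

-- line[2:].rstrip("\n") ported by hand: rstrip("\n") drops exactly the trailing '\n' characters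
def pvRstripNl (l : List Char) : List Char := (l.reverse.dropWhile (fun c => c == '\n')).reverse

-- ===== PORT A =====
-- A's loop state: (preamble_lines, sections, current_heading, current_body, first_h1_seen)
def pvStepA (st : List (List Char) × List (List Char × List Char) × Option (List Char) × List (List Char) × Bool)
    (line : List Char) :
    List (List Char) × List (List Char × List Char) × Option (List Char) × List (List Char) × Bool :=
  let (P, S, H, B, seen) := st
  if PySem.Chars.startswith line ['#', ' '] && !(PySem.Chars.startswith line ['#', '#', ' ']) then
    if !seen then (P ++ [line], S, H, B, true)
    else
      match H with
      | some h => (P, S ++ [(h, PySem.Chars.join [] B)],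
                   some (['#', '#', ' '] ++ pvRstripNl (PySem.List.slice line (some 2) none)), [], true)
      | none => (if B = [] then P else P ++ B, S,
                 some (['#', '#', ' '] ++ pvRstripNl (PySem.List.slice line (some 2) none)), [], true)
  else (P, S, H, B ++ [line], seen)

def pvFinishA (st : List (List Char) × List (List Char × List Char) × Option (List Char) × List (List Char) × Bool) :
    String × List (String × String) :=
  let (P, S, H, B, _) := st
  let (P', S') : List (List Char) × List (List Char × List Char) :=
    match H with
    | some h => (P, S ++ [(h, PySem.Chars.join [] B)])
    | none => (P ++ B, S)
  (String.ofList (PySem.Chars.strip (PySem.Chars.join [] P')),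
   S'.map (fun p => (String.ofList p.1, String.ofList p.2)))

def split_at_h1_py (content : String) : String × (List (String × String)) :=
  pvFinishA ((pvSplitKeep content.toList).foldl pvStepA ([], [], none, [], false))

-- ===== PORT B =====
def pvIsH1 (line : List Char) : Bool :=
  PySem.Chars.startswith line ['#', ' '] && !(PySem.Chars.startswith line ['#', '#', ' '])

-- _take_until_h1: while loop peeling lines into the accumulator until an H1 (or the end)
def pvSpanH1 (pre : List (List Char)) : List (List Char) → List (List Char) × List (List Char)
  | [] => (pre, [])
  | l :: ls => if pvIsH1 l then (pre, l :: ls) else pvSpanH1 (pre ++ [l]) ls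

theorem pvSpanH1_snd_len (ls : List (List Char)) : ∀ pre, (pvSpanH1 pre ls).2.length ≤ ls.length := by
  induction ls with
  | nil => intro pre; simp [pvSpanH1]
  | cons l ls ih =>
    intro pre
    by_cases h : pvIsH1 l = true <;> simp [pvSpanH1, h]
    exact Nat.le_succ_of_le (ih _)

-- the while loop over rest3: one (heading, body) chunk per remaining H1
def pvSections : List (List Char) → List (String × String)
  | [] => []
  | h :: tail =>
    let sp := pvSpanH1 [] tail
    (String.ofList (['#', '#', ' '] ++ pvRstripNl (PySem.List.slice h (some 2) none)),
     String.ofList (PySem.Chars.join [] sp.1)) :: pvSections sp.2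
termination_by ls => ls.length
decreasing_by
  exact Nat.lt_succ_of_le (pvSpanH1_snd_len tail [])

def split_at_h1_py_alt (content : String) : String × (List (String × String)) :=
  let lines := pvSplitKeep content.toList
  let (pre, rest) := pvSpanH1 [] lines
  match rest with
  | [] => (String.ofList (PySem.Chars.strip (PySem.Chars.join [] pre)), [])
  | title :: rest2 =>
    let (body0, rest3) := pvSpanH1 [] rest2
    (String.ofList (PySem.Chars.strip (PySem.Chars.join [] (title :: (pre ++ body0)))),
     pvSections rest3)

-- ===== PRECONDITION & SPEC =====
def Spec_split_at_h1_py (content : String) (out : String × (List (String × String))) : Prop := out = split_at_h1_py_alt content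
instance (content : String) (out : String × (List (String × String))) : Decidable (Spec_split_at_h1_py content out) := by unfold Spec_split_at_h1_py; infer_instance

-- ===== CLAIM (what is proved, stated in full; the proofs are below) =====
def Claim_equal_split_at_h1_py : Prop := ∀ (content : String), Dom_split_at_h1_py content → Spec_split_at_h1_py content (split_at_h1_py content)

-- ===== LEMMAS AND PROOFS =====

theorem pvSpanH1_acc (ls : List (List Char)) : ∀ pre,
    pvSpanH1 pre ls = (pre ++ (pvSpanH1 [] ls).1, (pvSpanH1 [] ls).2) := by
  induction ls with
  | nil => intro pre; simp [pvSpanH1]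
  | cons l ls ih =>
    intro pre
    by_cases h : pvIsH1 l = true
    · simp [pvSpanH1, h]
    · rw [show pvSpanH1 pre (l :: ls) = pvSpanH1 (pre ++ [l]) ls from by simp [pvSpanH1, h],
          show pvSpanH1 [] (l :: ls) = pvSpanH1 ([] ++ [l]) ls from by simp [pvSpanH1, h],
          ih (pre ++ [l]), ih ([] ++ [l])]
      simp

-- phase 2: a heading is open (current_heading = some h); the preamble is frozen and each
-- remaining H1 closes one section
theorem pvPhase2 (rest : List (List Char)) : ∀ P S h B,
    pvFinishA (rest.foldl pvStepA (P, S, some h, B, true)) =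
    (String.ofList (PySem.Chars.strip (PySem.Chars.join [] P)),
     S.map (fun p => (String.ofList p.1, String.ofList p.2)) ++
       ((String.ofList h, String.ofList (PySem.Chars.join [] (B ++ (pvSpanH1 [] rest).1))) ::
        pvSections (pvSpanH1 [] rest).2)) := by
  induction rest with
  | nil => intro P S h B; simp [pvFinishA, pvSpanH1, pvSections]
  | cons l ls ih =>
    intro P S h B
    by_cases hc : (PySem.Chars.startswith l ['#', ' '] && !(PySem.Chars.startswith l ['#', '#', ' '])) = true
    · rw [List.foldl_cons,
        show pvStepA (P, S, some h, B, true) l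
            = (P, S ++ [(h, PySem.Chars.join [] B)],
               some (['#', '#', ' '] ++ pvRstripNl (PySem.List.slice l (some 2) none)), [], true) from by
          simp [pvStepA, hc],
        ih]
      simp [pvSpanH1, pvIsH1, hc, pvSections]
    · rw [List.foldl_cons,
        show pvStepA (P, S, some h, B, true) l = (P, S, some h, B ++ [l], true) from by
          simp [pvStepA, hc],
        ih,
        show pvSpanH1 [] (l :: ls) = pvSpanH1 ([] ++ [l]) ls from by simp [pvSpanH1, pvIsH1, hc],
        pvSpanH1_acc ls ([] ++ [l])]
      simp

-- phase 1: the title has been seen but no further H1 yet (current_heading = none, seen = true)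
theorem pvPhase1 (ls : List (List Char)) : ∀ P B,
    pvFinishA (ls.foldl pvStepA (P, [], none, B, true)) =
    (String.ofList (PySem.Chars.strip (PySem.Chars.join [] ((P ++ B) ++ (pvSpanH1 [] ls).1))),
     pvSections (pvSpanH1 [] ls).2) := by
  induction ls with
  | nil => intro P B; simp [pvFinishA, pvSpanH1, pvSections]
  | cons l ls ih =>
    intro P B
    by_cases hc : (PySem.Chars.startswith l ['#', ' '] && !(PySem.Chars.startswith l ['#', '#', ' '])) = true
    · rw [List.foldl_cons,
        show pvStepA (P, [], none, B, true) l
            = (if B = [] then P else P ++ B, [],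
               some (['#', '#', ' '] ++ pvRstripNl (PySem.List.slice l (some 2) none)), [], true) from by
          simp [pvStepA, hc],
        pvPhase2]
      by_cases hB : B = []
      · subst hB; simp [pvSpanH1, pvIsH1, hc, pvSections]
      · rw [if_neg hB]; simp [pvSpanH1, pvIsH1, hc, pvSections]
    · rw [List.foldl_cons,
        show pvStepA (P, [], none, B, true) l = (P, [], none, B ++ [l], true) from by
          simp [pvStepA, hc],
        ih,
        show pvSpanH1 [] (l :: ls) = pvSpanH1 ([] ++ [l]) ls from by simp [pvSpanH1, pvIsH1, hc],
        pvSpanH1_acc ls ([] ++ [l])]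
      simp

-- phase 0: before the first H1 (seen = false); B is the body accumulated so far
theorem pvPhase0 (ls : List (List Char)) : ∀ B,
    pvFinishA (ls.foldl pvStepA ([], [], none, B, false)) =
    (match pvSpanH1 [] ls with
     | (pre, []) => (String.ofList (PySem.Chars.strip (PySem.Chars.join [] (B ++ pre))), [])
     | (pre, title :: rest2) =>
       (String.ofList (PySem.Chars.strip (PySem.Chars.join []
          (title :: ((B ++ pre) ++ (pvSpanH1 [] rest2).1)))),
        pvSections (pvSpanH1 [] rest2).2)) := by
  induction ls with
  | nil => intro B; simp [pvFinishA, pvSpanH1]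
  | cons l ls ih =>
    intro B
    by_cases hc : (PySem.Chars.startswith l ['#', ' '] && !(PySem.Chars.startswith l ['#', '#', ' '])) = true
    · rw [List.foldl_cons,
        show pvStepA ([], [], none, B, false) l = ([] ++ [l], [], none, B, true) from by
          simp [pvStepA, hc],
        show ([] ++ [l] : List (List Char)) = [l] from by simp,
        pvPhase1,
        show pvSpanH1 [] (l :: ls) = ([], l :: ls) from by simp [pvSpanH1, pvIsH1, hc]]
      simp
    · rw [List.foldl_cons,
        show pvStepA ([], [], none, B, false) l = ([], [], none, B ++ [l], false) from by
          simp [pvStepA, hc],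
        ih,
        show pvSpanH1 [] (l :: ls) = pvSpanH1 ([] ++ [l]) ls from by simp [pvSpanH1, pvIsH1, hc],
        pvSpanH1_acc ls ([] ++ [l])]
      rcases hsp : pvSpanH1 [] ls with ⟨s1, s2⟩
      cases s2 <;> simp

-- ===== VERDICT (by name: the statement is the Claim_ definition above) =====
theorem split_at_h1_py_spec : Claim_equal_split_at_h1_py := by
  intro content _
  unfold Spec_split_at_h1_py split_at_h1_py split_at_h1_py_alt
  rw [pvPhase0 (pvSplitKeep content.toList) []]
  rcases hsp : pvSpanH1 [] (pvSplitKeep content.toList) with ⟨pre, rest⟩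
  cases rest with
  | nil => simp [hsp]
  | cons title rest2 => simp [hsp]
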